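-- pv_equiv track=rewrite | github.com/SwaonD/wakfu_data | src/core/tools/json_tools.py | put_key_at_position
-- ===== SOURCE A (Python) =====
-- def put_key_at_position(parent_key: dict, new_key: str, value, pos: int) \
-- 		-> dict:
-- 	new_parent_key = {}
-- 	key_added = False
-- 	for i, key in enumerate(parent_key.keys()):
-- 		if i == pos:
-- 			new_parent_key[new_key] = value
-- 			key_added = True
-- 		new_parent_key[key] = parent_key[key]
-- 	if not key_added and len(parent_key.keys()) > 0:
-- 		new_parent_key[new_key] = value
-- 	return new_parent_key
-- ===== SOURCE B (Python) =====
-- def put_key_at_position(parent_key: dict, new_key: str, value, pos: int) \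
-- 		-> dict:
-- 	items = list(parent_key.items())
-- 	index = pos if 0 <= pos < len(items) else len(items)
-- 	items.insert(index, (new_key, value))
-- 	return dict(items)
-- ===== Notes on version B (the rewrite author's own statement) =====
-- stated objective: idiomatic
-- what changed: Replaces A's enumerate-with-flag incremental dict rebuild by splicing (new_key, value) into the items list at the clamped index and reconstructing with dict().
-- intended difference: On an empty parent_key A returns {} (its len>0 guard silently drops the new key) while B returns {new_key: value}, which is the intended result of inserting a key. — e.g. on put_key_at_position([], "a", 1, 0): A returns [], B returns [("a", 1)]
import Mathlib
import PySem

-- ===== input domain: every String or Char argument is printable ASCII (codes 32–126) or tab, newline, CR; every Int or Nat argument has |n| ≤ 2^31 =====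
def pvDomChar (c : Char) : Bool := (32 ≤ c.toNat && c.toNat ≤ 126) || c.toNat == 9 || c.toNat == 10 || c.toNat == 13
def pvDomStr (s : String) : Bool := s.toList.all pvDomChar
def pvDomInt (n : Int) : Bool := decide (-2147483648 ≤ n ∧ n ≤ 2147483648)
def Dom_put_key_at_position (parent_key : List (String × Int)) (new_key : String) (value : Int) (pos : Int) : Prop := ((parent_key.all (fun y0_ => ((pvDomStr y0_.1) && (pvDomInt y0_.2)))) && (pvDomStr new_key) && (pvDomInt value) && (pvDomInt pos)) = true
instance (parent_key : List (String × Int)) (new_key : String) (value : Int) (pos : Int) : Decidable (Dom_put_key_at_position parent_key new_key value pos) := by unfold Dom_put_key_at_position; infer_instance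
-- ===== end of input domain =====

-- B rebuilds the dict by splicing the new pair into the items list at the clamped index (idiomatic decomposition);
-- on the empty dict A returns {} while B inserts the key — stated as the intended difference D_ below.

-- ===== PORT A =====
-- loop body of A's 'for i, key in enumerate(parent_key.keys())', named as a helper
def pvAStep (new_key : String) (value : Int) (pos : Int) (d : PySem.Dict String Int)
    (st : PySem.Dict String Int × Bool) (q : Int × String) : PySem.Dict String Int × Bool :=
  let st := if q.1 == pos then (st.1.insert new_key value, true) else st
  (st.1.insert q.2 (d.getD q.2 0), st.2)

def put_key_at_position (parent_key : List (String × Int)) (new_key : String) (value : Int) (pos : Int) : List (String × Int) :=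
  let d := PySem.Dict.ofList parent_key
  let st := (PySem.List.enumerate d.keys 0).foldl (pvAStep new_key value pos d) (PySem.Dict.empty, false)
  let npk := if !st.2 && decide (0 < d.keys.length) then st.1.insert new_key value else st.1
  npk.items

-- ===== PORT B =====
def put_key_at_position_alt (parent_key : List (String × Int)) (new_key : String) (value : Int) (pos : Int) : List (String × Int) :=
  let items := (PySem.Dict.ofList parent_key).items
  let index : Int := if 0 ≤ pos ∧ pos < (items.length : Int) then pos else (items.length : Int)
  let items2 := PySem.List.insert items index (new_key, value)
  (PySem.Dict.ofList items2).items

-- ===== PRECONDITION & SPEC =====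
-- On an empty parent_key A returns {} (its len>0 guard silently drops the new key) while B returns
-- {new_key: value}, which is the intended result of inserting a key.
def D_put_key_at_position (parent_key : List (String × Int)) (new_key : String) (value : Int) (pos : Int) : Prop := parent_key = []
instance (parent_key : List (String × Int)) (new_key : String) (value : Int) (pos : Int) : Decidable (D_put_key_at_position parent_key new_key value pos) := by unfold D_put_key_at_position; infer_instance

def Spec_put_key_at_position (parent_key : List (String × Int)) (new_key : String) (value : Int) (pos : Int) (out : List (String × Int)) : Prop := ¬ D_put_key_at_position parent_key new_key value pos → out = put_key_at_position_alt parent_key new_key value pos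
instance (parent_key : List (String × Int)) (new_key : String) (value : Int) (pos : Int) (out : List (String × Int)) : Decidable (Spec_put_key_at_position parent_key new_key value pos out) := by unfold Spec_put_key_at_position; infer_instance

def pvDiffWitness_put_key_at_position : (List (String × Int)) × String × Int × Int := ([], "a", 1, 0)
def pvDiffWitnessOut_put_key_at_position : (List (String × Int)) × (List (String × Int)) := ([], [("a", 1)])

-- ===== CLAIM (what is proved, stated in full; the proofs are below) =====
def Claim_unchanged_put_key_at_position : Prop := ∀ (parent_key : List (String × Int)) (new_key : String) (value : Int) (pos : Int), Dom_put_key_at_position parent_key new_key value pos → Spec_put_key_at_position parent_key new_key value pos (put_key_at_position parent_key new_key value pos)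
def Claim_changed_put_key_at_position : Prop := Dom_put_key_at_position (pvDiffWitness_put_key_at_position.1) (pvDiffWitness_put_key_at_position.2.1) (pvDiffWitness_put_key_at_position.2.2.1) (pvDiffWitness_put_key_at_position.2.2.2) ∧ D_put_key_at_position (pvDiffWitness_put_key_at_position.1) (pvDiffWitness_put_key_at_position.2.1) (pvDiffWitness_put_key_at_position.2.2.1) (pvDiffWitness_put_key_at_position.2.2.2) ∧ put_key_at_position (pvDiffWitness_put_key_at_position.1) (pvDiffWitness_put_key_at_position.2.1) (pvDiffWitness_put_key_at_position.2.2.1) (pvDiffWitness_put_key_at_position.2.2.2) = pvDiffWitnessOut_put_key_at_position.1 ∧ put_key_at_position_alt (pvDiffWitness_put_key_at_position.1) (pvDiffWitness_put_key_at_position.2.1) (pvDiffWitness_put_key_at_position.2.2.1) (pvDiffWitness_put_key_at_position.2.2.2) = pvDiffWitnessOut_put_key_at_position.2 ∧ pvDiffWitnessOut_put_key_at_position.1 ≠ pvDiffWitnessOut_put_key_at_position.2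
def Claim_exact_put_key_at_position : Prop := ∀ (parent_key : List (String × Int)) (new_key : String) (value : Int) (pos : Int), Dom_put_key_at_position parent_key new_key value pos → D_put_key_at_position parent_key new_key value pos → put_key_at_position parent_key new_key value pos ≠ put_key_at_position_alt parent_key new_key value pos

-- ===== LEMMAS AND PROOFS =====

-- the same loop body over enumerated ITEMS (the dict lookup resolved to the pair's own value)
def pvGStep (new_key : String) (value : Int) (pos : Int)
    (st : PySem.Dict String Int × Bool) (q : Int × (String × Int)) : PySem.Dict String Int × Bool :=
  let st := if q.1 == pos then (st.1.insert new_key value, true) else st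
  (st.1.insert q.2.1 q.2.2, st.2)

-- folding Dict.insert over a list of pairs (Dict.ofList l = pvInsSeq empty l by definition)
def pvInsSeq (acc : PySem.Dict String Int) (l : List (String × Int)) : PySem.Dict String Int :=
  l.foldl (fun a p => a.insert p.1 p.2) acc

def pvSplice (l : List (String × Int)) (k : Nat) (x : String × Int) : List (String × Int) :=
  l.take k ++ x :: l.drop k

lemma pvInsSeq_cons (acc : PySem.Dict String Int) (p : String × Int) (l : List (String × Int)) :
    pvInsSeq acc (p :: l) = pvInsSeq (acc.insert p.1 p.2) l := rfl

lemma pvInsSeq_append_singleton (acc : PySem.Dict String Int) (l : List (String × Int)) (x : String × Int) :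
    pvInsSeq acc (l ++ [x]) = (pvInsSeq acc l).insert x.1 x.2 := by
  simp [pvInsSeq]

lemma pvOfList_eq_insSeq (l : List (String × Int)) :
    PySem.Dict.ofList l = pvInsSeq PySem.Dict.empty l := rfl

lemma pvList_insert_eq_splice (xs : List (String × Int)) (n : Nat) (h : n ≤ xs.length) (v : String × Int) :
    PySem.List.insert xs (n : Int) v = pvSplice xs n v := by
  simp only [PySem.List.insert, PySem.List.sliceIndices, pvSplice]
  norm_num
  rw [if_neg (by omega), show (min (n : Int) xs.length).toNat = n by omega]

-- the keys-fold of A equals the items-fold, once every looked-up key carries its own value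
lemma pvAStep_to_gStep (new_key : String) (value : Int) (pos : Int) (d : PySem.Dict String Int)
    (l : List (String × Int)) (hl : ∀ p ∈ l, d.getD p.1 0 = p.2) :
    ∀ (i : Int) (st : PySem.Dict String Int × Bool),
      (PySem.List.enumerate (l.map (·.1)) i).foldl (pvAStep new_key value pos d) st
        = (PySem.List.enumerate l i).foldl (pvGStep new_key value pos) st := by
  induction l with
  | nil => intro i st; rfl
  | cons p l ih =>
      intro i st
      have hp : d.getD p.1 0 = p.2 := hl p (by simp)
      simp only [List.map_cons, PySem.List.enumerate_cons, List.foldl_cons]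
      rw [show pvAStep new_key value pos d st (i, p.1) = pvGStep new_key value pos st (i, p) by
        simp [pvAStep, pvGStep, hp]]
      exact ih (fun q hq => hl q (by simp [hq])) (i + 1) _

-- the enumerate-with-flag loop, characterised: it splices (new_key, value) in when pos falls in range
lemma pvGStep_fold (new_key : String) (value : Int) (pos : Int) (l : List (String × Int)) :
    ∀ (i : Int) (st : PySem.Dict String Int × Bool),
      (PySem.List.enumerate l i).foldl (pvGStep new_key value pos) st
        = if i ≤ pos ∧ pos < i + l.length
          then (pvInsSeq st.1 (pvSplice l (pos - i).toNat (new_key, value)), true)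
          else (pvInsSeq st.1 l, st.2) := by
  induction l with
  | nil =>
      intro i st
      rw [if_neg (by simp)]
      rfl
  | cons p l ih =>
      intro i st
      simp only [PySem.List.enumerate_cons, List.foldl_cons]
      by_cases hi : i = pos
      · rw [show pvGStep new_key value pos st (i, p)
              = ((st.1.insert new_key value).insert p.1 p.2, true) by simp [pvGStep, hi]]
        rw [ih (i + 1) _, if_neg (by push Not; intro h; omega),
            if_pos (by constructor <;> [omega; (simp; omega)])]
        have : (pos - i).toNat = 0 := by omega
        simp only [this, pvSplice, List.take_zero, List.drop_zero, List.nil_append]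
        rw [pvInsSeq_cons, pvInsSeq_cons]
      · rw [show pvGStep new_key value pos st (i, p) = (st.1.insert p.1 p.2, st.2) by
          simp [pvGStep, hi]]
        rw [ih (i + 1) _]
        by_cases hc : i + 1 ≤ pos ∧ pos < i + 1 + l.length
        · rw [if_pos hc, if_pos (by constructor <;> [omega; (simp; omega)])]
          have hk : (pos - i).toNat = (pos - (i + 1)).toNat + 1 := by omega
          simp only [hk, pvSplice, List.take_succ_cons, List.drop_succ_cons, List.cons_append]
          rw [pvInsSeq_cons]
        · rw [if_neg hc, if_neg (by push Not at hc ⊢; intro h; simp; omega)]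
          rw [pvInsSeq_cons]

lemma pvItems_insert_ne_nil (d : PySem.Dict String Int) (k : String) (v : Int) :
    (d.insert k v).items ≠ [] := by
  by_cases h : d.contains k
  · rw [PySem.Dict.items_insert_of_contains _ _ h]
    intro hnil
    have := congrArg List.length hnil
    simp at this
    have : k ∈ d.keys := (PySem.Dict.contains_iff_mem_keys d k).mp h
    rw [PySem.Dict.keys, ‹d.items = []›] at this
    simp at this
  · rw [PySem.Dict.items_insert_of_not_contains _ _ (by simpa using h)]
    simp

lemma pvInsSeq_items_ne_nil (l : List (String × Int)) (d : PySem.Dict String Int)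
    (hd : d.items ≠ []) : (pvInsSeq d l).items ≠ [] := by
  induction l generalizing d with
  | nil => exact hd
  | cons p l ih => rw [pvInsSeq_cons]; exact ih _ (pvItems_insert_ne_nil d p.1 p.2)

lemma pvOfList_items_ne_nil (l : List (String × Int)) (hl : l ≠ []) :
    (PySem.Dict.ofList l).items ≠ [] := by
  match l with
  | [] => exact absurd rfl hl
  | p :: l =>
      rw [pvOfList_eq_insSeq, pvInsSeq_cons]
      exact pvInsSeq_items_ne_nil l _ (pvItems_insert_ne_nil _ p.1 p.2)

lemma pvA_empty (new_key : String) (value : Int) (pos : Int) :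
    put_key_at_position [] new_key value pos = [] := rfl

lemma pvB_empty (new_key : String) (value : Int) (pos : Int) :
    put_key_at_position_alt [] new_key value pos = [(new_key, value)] := by
  simp [put_key_at_position_alt, PySem.List.insert, PySem.List.sliceIndices,
        PySem.Dict.ofList, PySem.Dict.update, PySem.Dict.insert, PySem.Dict.empty,
        PySem.Dict.contains]

-- ===== VERDICT (by name: the statement is the Claim_ definition above) =====
theorem put_key_at_position_spec : Claim_unchanged_put_key_at_position := by
  intro parent_key new_key value pos _ hD
  replace hD : parent_key ≠ [] := hD
  -- abbreviations
  set d := PySem.Dict.ofList parent_key with hd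
  have hnd : d.keys.Nodup := PySem.Dict.nodup_keys_ofList parent_key
  have hne : d.items ≠ [] := pvOfList_items_ne_nil parent_key hD
  have hv : ∀ p ∈ d.items, d.getD p.1 0 = p.2 := by
    intro p hp
    exact PySem.Dict.getD_of_mem_items d (by simpa using hp) hnd 0
  have hkeys : d.keys = d.items.map (·.1) := rfl
  have hklen : d.keys.length = d.items.length := by rw [hkeys]; simp
  have hfold :
      (PySem.List.enumerate d.keys 0).foldl (pvAStep new_key value pos d) (PySem.Dict.empty, false)
        = if 0 ≤ pos ∧ pos < (d.items.length : Int)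
          then (pvInsSeq PySem.Dict.empty (pvSplice d.items pos.toNat (new_key, value)), true)
          else (pvInsSeq PySem.Dict.empty d.items, false) := by
    rw [hkeys, pvAStep_to_gStep new_key value pos d d.items hv 0 _,
        pvGStep_fold new_key value pos d.items 0 _]
    simp only [zero_add, Int.sub_zero]
  by_cases hc : 0 ≤ pos ∧ pos < (d.items.length : Int)
  · simp only [put_key_at_position, put_key_at_position_alt, ← hd]
    rw [hfold, if_pos hc]
    simp only [Bool.not_true, Bool.false_and, if_pos hc]
    rw [show (pos : Int) = ((pos.toNat : Nat) : Int) by omega,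
        pvList_insert_eq_splice d.items pos.toNat (by omega) (new_key, value),
        pvOfList_eq_insSeq]
    simp
    rw [max_eq_left hc.1]
  · simp only [put_key_at_position, put_key_at_position_alt, ← hd]
    rw [hfold, if_neg hc]
    have hlen : 0 < d.keys.length := by
      rw [hklen]; exact List.length_pos_iff.mpr hne
    simp only [Bool.not_false, Bool.true_and, decide_eq_true_eq, if_pos hlen, if_neg hc]
    rw [pvList_insert_eq_splice d.items d.items.length (le_refl _) (new_key, value),
        pvOfList_eq_insSeq]
    rw [show pvSplice d.items d.items.length (new_key, value) = d.items ++ [(new_key, value)] by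
      simp [pvSplice]]
    rw [pvInsSeq_append_singleton]

theorem put_key_at_position_changed : Claim_changed_put_key_at_position := by
  unfold Claim_changed_put_key_at_position; decide

theorem put_key_at_position_tight : Claim_exact_put_key_at_position := by
  intro parent_key new_key value pos _ hD
  unfold D_put_key_at_position at hD
  subst hD
  rw [pvA_empty, pvB_empty]
  simp
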